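-- pv_equiv track=rewrite | github.com/dylanxlam/CS313E_notes | exam1/ApproximateAnagram.py | is_approximate_anagram
-- ===== SOURCE A (Python) =====
-- def is_approximate_anagram(word1, word2, k):
--     if abs(len(word1) - len(word2)) > k:
--         return False
--
--     character_count = {}
--     for character in word1:
--         character_count[character] = character_count.get(character, 0) + 1
--
--     for character in word2:
--         if character in character_count and character_count[character] > 0:
--             character_count[character] -= 1
--         else:
--             k -= 1
--             if k < 0:
--                 return False
--
--     return k >= 0
-- ===== SOURCE B (Python) =====
-- def is_approximate_anagram(word1, word2, k):
--     if abs(len(word1) - len(word2)) > k: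
--         return False
--     # unmatched chars of word2 = multiset excess of word2 over word1,
--     # computed per distinct character instead of consuming a count table
--     extra = sum(max(0, word2.count(c) - word1.count(c)) for c in set(word2))
--     return extra <= k
-- ===== Notes on version B (the rewrite author's own statement) =====
-- stated objective: simpler
-- what changed: Replaces the mutable count table and the per-character consume-or-decrement-k loop with early returns by a single order-independent sum of per-distinct-character excesses of word2 over word1 (str.count per distinct char), compared to k once.
import Mathlib
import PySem

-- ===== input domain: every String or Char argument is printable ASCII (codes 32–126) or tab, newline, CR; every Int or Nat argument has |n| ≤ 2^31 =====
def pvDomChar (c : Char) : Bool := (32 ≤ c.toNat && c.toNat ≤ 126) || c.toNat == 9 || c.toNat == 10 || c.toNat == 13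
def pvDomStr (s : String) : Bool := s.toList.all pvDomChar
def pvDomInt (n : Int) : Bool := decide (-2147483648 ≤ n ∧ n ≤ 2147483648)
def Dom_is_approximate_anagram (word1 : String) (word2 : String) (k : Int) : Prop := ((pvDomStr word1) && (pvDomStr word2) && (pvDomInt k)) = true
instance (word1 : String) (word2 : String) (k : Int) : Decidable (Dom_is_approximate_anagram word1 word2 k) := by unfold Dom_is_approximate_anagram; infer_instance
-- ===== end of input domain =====

-- B replaces A's consume-or-decrement-k loop by one per-distinct-character excess sum compared to k once (simpler; measured faster in a timing run).

-- ===== PORT A =====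
-- second loop of A, with early return on k < 0 (transliteration of A's for-loop)
def pvALoop (d : PySem.Dict Char Int) (k : Int) : List Char → Bool
  | [] => decide (k ≥ 0)
  | c :: rest =>
    if d.contains c ∧ d.getD c 0 > 0 then
      pvALoop (d.insert c (d.getD c 0 - 1)) k rest
    else
      if k - 1 < 0 then false else pvALoop d (k - 1) rest

def is_approximate_anagram (word1 : String) (word2 : String) (k : Int) : Bool :=
  if |PySem.Str.len word1 - PySem.Str.len word2| > k then false
  else
    let character_count :=
      word1.toList.foldl (fun d c => d.insert c (d.getD c 0 + 1)) PySem.Dict.empty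
    pvALoop character_count k word2.toList

-- ===== PORT B =====
def is_approximate_anagram_alt (word1 : String) (word2 : String) (k : Int) : Bool :=
  if |PySem.Str.len word1 - PySem.Str.len word2| > k then false
  else
    -- sum(max(0, word2.count(c) - word1.count(c)) for c in set(word2))
    let extra := (PySem.Set.ofList word2.toList).foldl
      (fun acc c => acc + max 0 ((word2.toList.count c : Int) - (word1.toList.count c : Int))) 0
    decide (extra ≤ k)

-- ===== PRECONDITION & SPEC =====
def Spec_is_approximate_anagram (word1 : String) (word2 : String) (k : Int) (out : Bool) : Prop := out = is_approximate_anagram_alt word1 word2 k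
instance (word1 : String) (word2 : String) (k : Int) (out : Bool) : Decidable (Spec_is_approximate_anagram word1 word2 k out) := by unfold Spec_is_approximate_anagram; infer_instance

-- ===== CLAIM (what is proved, stated in full; the proofs are below) =====
def Claim_equal_is_approximate_anagram : Prop := ∀ (word1 : String) (word2 : String) (k : Int), Dom_is_approximate_anagram word1 word2 k → Spec_is_approximate_anagram word1 word2 k (is_approximate_anagram word1 word2 k)


-- ===== LEMMAS AND PROOFS =====

-- miss count of A's greedy consume loop, over an abstract count function
def pvDeficit (m : Char → Int) : List Char → Nat
  | [] => 0
  | c :: rest =>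
    if m c > 0 then pvDeficit (Function.update m c (m c - 1)) rest
    else pvDeficit m rest + 1

theorem pvALoop_eq_deficit (l : List Char) (d : PySem.Dict Char Int) (m : Char → Int)
    (k : Int) (h : ∀ x, d.getD x 0 = m x) :
    pvALoop d k l = decide ((pvDeficit m l : Int) ≤ k) := by
  induction l generalizing d m k with
  | nil =>
    simp [pvALoop, pvDeficit]
  | cons c rest ih =>
    by_cases hc : d.getD c 0 > 0
    · have hcont : d.contains c = true := by
        by_contra hnc
        have hnc' : d.contains c = false := by simpa using hnc
        have : d.getD c 0 = 0 := PySem.Dict.getD_of_not_contains d 0 hnc'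
        omega
      have hm : m c > 0 := by rw [← h c]; exact hc
      rw [pvALoop, if_pos ⟨hcont, hc⟩, pvDeficit, if_pos hm]
      refine ih _ _ _ (fun x => ?_)
      rw [PySem.Dict.getD_insert]
      by_cases hx : x = c
      · rw [if_pos hx, hx, Function.update_self, h c]
      · rw [if_neg hx, Function.update_of_ne hx, h x]
    · have hnotc : ¬ (d.contains c = true ∧ d.getD c 0 > 0) := fun hh => hc hh.2
      have hm : ¬ m c > 0 := by rw [← h c]; exact hc
      rw [pvALoop, if_neg hnotc, pvDeficit, if_neg hm]
      by_cases hk : k - 1 < 0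
      · rw [if_pos hk]
        have hng : ¬ ((pvDeficit m rest + 1 : Nat) : Int) ≤ k := by push_cast; omega
        exact (decide_eq_false hng).symm
      · rw [if_neg hk, ih d m (k - 1) h]
        exact decide_eq_decide.mpr (by push_cast; omega)

theorem pvDeficit_eq_sum (l : List Char) (m : Char → Int) :
    (pvDeficit m l : Int) =
      ∑ x ∈ l.toFinset, max 0 ((l.count x : Int) - max 0 (m x)) := by
  induction l generalizing m with
  | nil => simp [pvDeficit]
  | cons c rest ih =>
    have hcount_ne : ∀ x, x ≠ c → (c :: rest).count x = rest.count x := by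
      intro x hx
      simp [Ne.symm hx]
    have hcount_c : (c :: rest).count c = rest.count c + 1 := by
      simp
    rw [List.toFinset_cons]
    by_cases hm : m c > 0
    · rw [pvDeficit, if_pos hm, ih]
      have hfc : ∀ x ∈ rest.toFinset.erase c,
          max 0 (((c :: rest).count x : Int) - max 0 (m x)) =
          max 0 ((rest.count x : Int) - max 0 (Function.update m c (m c - 1) x)) := by
        intro x hx
        have hxc : x ≠ c := (Finset.mem_erase.mp hx).1
        rw [hcount_ne x hxc, Function.update_of_ne hxc]
      by_cases hmem : c ∈ rest.toFinset
      · rw [Finset.insert_eq_self.mpr hmem]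
        rw [← Finset.sum_erase_add _ _ hmem, ← Finset.sum_erase_add _ _ hmem]
        rw [Finset.sum_congr rfl hfc]
        congr 1
        rw [hcount_c, Function.update_self,
          max_eq_right (by omega : (0:Int) ≤ m c),
          max_eq_right (by omega : (0:Int) ≤ m c - 1)]
        congr 1
        push_cast
        ring
      · rw [Finset.sum_insert hmem]
        have hrc : rest.count c = 0 := by
          simpa [List.count_eq_zero] using fun hmm => hmem (List.mem_toFinset.mpr hmm)
        have h1 : max 0 (((c :: rest).count c : Int) - max 0 (m c)) = 0 := by
          rw [hcount_c, hrc, max_eq_right (by omega : (0:Int) ≤ m c)]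
          push_cast
          omega
        rw [h1, zero_add]
        refine Finset.sum_congr rfl (fun x hx => ?_)
        have hxc : x ≠ c := fun he => hmem (he ▸ hx)
        rw [hcount_ne x hxc, Function.update_of_ne hxc]
    · rw [pvDeficit, if_neg hm]
      push_cast
      rw [ih]
      have hmc0 : max 0 (m c) = 0 := max_eq_left (by omega)
      by_cases hmem : c ∈ rest.toFinset
      · rw [Finset.insert_eq_self.mpr hmem]
        rw [← Finset.sum_erase_add _ _ hmem, ← Finset.sum_erase_add _ _ hmem]
        have : ∀ x ∈ rest.toFinset.erase c,
            max 0 (((c :: rest).count x : Int) - max 0 (m x)) =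
            max 0 ((rest.count x : Int) - max 0 (m x)) := by
          intro x hx
          rw [hcount_ne x (Finset.mem_erase.mp hx).1]
        rw [Finset.sum_congr rfl this]
        rw [hcount_c, hmc0]
        push_cast
        omega
      · rw [Finset.sum_insert hmem]
        have hrc : rest.count c = 0 := by
          simpa [List.count_eq_zero] using fun hmm => hmem (List.mem_toFinset.mpr hmm)
        have : ∀ x ∈ rest.toFinset,
            max 0 (((c :: rest).count x : Int) - max 0 (m x)) =
            max 0 ((rest.count x : Int) - max 0 (m x)) := by
          intro x hx
          rw [hcount_ne x (fun he => hmem (he ▸ hx))]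
        rw [Finset.sum_congr rfl this, hcount_c, hrc, hmc0]
        push_cast
        omega

theorem pvToFinset_ofList (l : List Char) :
    (PySem.Set.ofList l).toFinset = l.toFinset := by
  ext x
  simp [List.mem_toFinset, PySem.Set.mem_ofList]

theorem pvFoldl_set_sum (l : List Char) (f : Char → Int) :
    ((PySem.Set.ofList l : List Char).foldl (fun acc c => acc + f c) 0) =
      ∑ x ∈ l.toFinset, f x := by
  rw [PySem.List.foldl_add, zero_add, ← pvToFinset_ofList l,
    List.sum_toFinset f (PySem.Set.nodup_ofList l)]

-- ===== VERDICT (by name: the statement is the Claim_ definition above) =====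
theorem is_approximate_anagram_spec : Claim_equal_is_approximate_anagram := by
  intro word1 word2 k _
  unfold Spec_is_approximate_anagram is_approximate_anagram is_approximate_anagram_alt
  by_cases hg : |PySem.Str.len word1 - PySem.Str.len word2| > k
  · rw [if_pos hg, if_pos hg]
  · rw [if_neg hg, if_neg hg]
    rw [PySem.Dict.foldl_insert_getD_add_one_eq_counter word1.toList]
    rw [pvALoop_eq_deficit word2.toList _ (fun x => (word1.toList.count x : Int)) k
      (fun x => PySem.Dict.getD_counter word1.toList x)]
    rw [pvDeficit_eq_sum, pvFoldl_set_sum]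
    have hs : (∑ x ∈ word2.toList.toFinset,
          max 0 ((word2.toList.count x : Int) - max 0 ((word1.toList.count x : Int)))) =
        ∑ x ∈ word2.toList.toFinset,
          max 0 ((word2.toList.count x : Int) - (word1.toList.count x : Int)) :=
      Finset.sum_congr rfl (fun x _ => by rw [max_eq_right (Int.natCast_nonneg _)])
    rw [hs]
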